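-- pv_equiv track=rewrite | github.com/txuyuan/CallScheduler | main.py | get_weekends
-- ===== SOURCE A (Python) =====
-- def get_weekends(num_days):
--     weekends = []
--     for i in range(len(range(num_days))):
--         if i % 7 == 0 or i % 7 == 1:
--             weekends.append(1)
--         else:
--             weekends.append(0)
--     return weekends
-- ===== SOURCE B (Python) =====
-- def get_weekends(num_days):
--     # Tile a fixed one-week pattern and slice, instead of testing i % 7 per day.
--     pattern = [1, 1, 0, 0, 0, 0, 0]
--     return (pattern * (num_days // 7 + 1))[:num_days]
-- ===== Notes on version B (the rewrite author's own statement) =====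
-- stated objective: simpler
-- what changed: B replicates a fixed one-week template list and slices it to the requested length instead of looping over each day and branching on the day's weekday remainder.
import Mathlib
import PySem

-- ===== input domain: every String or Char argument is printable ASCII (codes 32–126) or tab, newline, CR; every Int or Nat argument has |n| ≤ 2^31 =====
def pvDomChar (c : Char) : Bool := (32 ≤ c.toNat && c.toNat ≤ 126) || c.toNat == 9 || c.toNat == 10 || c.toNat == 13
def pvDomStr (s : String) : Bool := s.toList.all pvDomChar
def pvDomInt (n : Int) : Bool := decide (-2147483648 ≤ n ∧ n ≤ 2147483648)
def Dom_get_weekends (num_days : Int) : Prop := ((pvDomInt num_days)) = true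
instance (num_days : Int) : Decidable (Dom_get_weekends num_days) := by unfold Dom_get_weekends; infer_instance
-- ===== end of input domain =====

-- B tiles a fixed 7-day template and slices it, instead of branching on i % 7 per day (objective: simpler).

-- ===== PORT A =====
def get_weekends (num_days : Int) : List Int :=
  let n : Int := (PySem.List.pyRange 0 num_days 1).length
  (PySem.List.pyRange 0 n 1).foldl
    (fun weekends i =>
      if PySem.Int.mod i 7 == 0 || PySem.Int.mod i 7 == 1 then weekends ++ [(1 : Int)]
      else weekends ++ [(0 : Int)]) []

-- ===== PORT B =====
def get_weekends_alt (num_days : Int) : List Int :=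
  let pattern : List Int := [1, 1, 0, 0, 0, 0, 0]
  let reps : Int := PySem.Int.floordiv num_days 7 + 1
  PySem.List.slice (List.flatten (List.replicate reps.toNat pattern)) none (some num_days)

-- ===== PRECONDITION & SPEC =====
def Spec_get_weekends (num_days : Int) (out : List Int) : Prop := out = get_weekends_alt num_days
instance (num_days : Int) (out : List Int) : Decidable (Spec_get_weekends num_days out) := by unfold Spec_get_weekends; infer_instance

-- ===== CLAIM (what is proved, stated in full; the proofs are below) =====
def Claim_equal_get_weekends : Prop := ∀ (num_days : Int), Dom_get_weekends num_days → Spec_get_weekends num_days (get_weekends num_days)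

-- ===== LEMMAS AND PROOFS =====

def pvDay (j : Nat) : Int := if (j : Int) % 7 == 0 || (j : Int) % 7 == 1 then 1 else 0

theorem pvDay_add_seven (j : Nat) : pvDay (7 + j) = pvDay j := by
  unfold pvDay
  have h : ((7 + j : Nat) : Int) % 7 = (j : Int) % 7 := by
    push_cast; omega
  rw [h]

theorem pv_tile (k : Nat) :
    (List.replicate k ([1, 1, 0, 0, 0, 0, 0] : List Int)).flatten
      = (List.range (7 * k)).map pvDay := by
  induction k with
  | zero => simp
  | succ k ih =>
    have h7 : 7 * (k + 1) = 7 + 7 * k := by ring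
    rw [List.replicate_succ, List.flatten_cons, ih, h7, List.range_add, List.map_append,
        List.map_map,
        show ([1, 1, 0, 0, 0, 0, 0] : List Int) = (List.range 7).map pvDay from by decide]
    congr 1
    exact (List.map_congr_left fun j _ => pvDay_add_seven j).symm

theorem pv_A (num_days : Int) :
    get_weekends num_days = (List.range num_days.toNat).map pvDay := by
  unfold get_weekends
  have hlen : ((PySem.List.pyRange 0 num_days 1).length : Int) = (num_days.toNat : Int) := by
    rw [PySem.List.length_pyRange_one]; omega
  rw [hlen]
  have hstep : ∀ (acc : List Int) (i : Int),
      (if PySem.Int.mod i 7 == 0 || PySem.Int.mod i 7 == 1 then acc ++ [(1 : Int)]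
       else acc ++ [(0 : Int)])
      = acc ++ [if PySem.Int.mod i 7 == 0 || PySem.Int.mod i 7 == 1 then (1 : Int) else 0] := by
    intro acc i; split <;> rfl
  rw [funext fun acc => funext fun i => hstep acc i,
      PySem.List.foldl_append_singleton_eq_map, List.nil_append,
      PySem.List.pyRange_one, List.map_map]
  refine List.map_congr_left (fun j _ => ?_)
  simp only [Function.comp, pvDay, PySem.Int.mod]
  have hm : ((0 + (j : Int))).fmod 7 = (j : Int) % 7 := by
    rw [Int.zero_add, Int.fmod_eq_emod]; simp
  simp only [hm]

theorem pv_B (num_days : Int) :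
    get_weekends_alt num_days = (List.range num_days.toNat).map pvDay := by
  unfold get_weekends_alt
  dsimp only
  have hfd : PySem.Int.floordiv num_days 7 = num_days / 7 :=
    PySem.Int.floordiv_eq_ediv_of_pos (by norm_num)
  by_cases hpos : 0 ≤ num_days
  · have h7k : num_days.toNat ≤ 7 * (PySem.Int.floordiv num_days 7 + 1).toNat := by
      rw [hfd]; omega
    rw [pv_tile, PySem.List.slice_to _ _, ← List.map_take, List.take_range,
        Nat.min_eq_left h7k]
    exact hpos
  · have h0 : (PySem.Int.floordiv num_days 7 + 1).toNat = 0 := by rw [hfd]; omega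
    have hn : num_days.toNat = 0 := by omega
    rw [h0, hn]
    simp [PySem.List.slice]

-- ===== VERDICT (by name: the statement is the Claim_ definition above) =====
theorem get_weekends_spec : Claim_equal_get_weekends := by
  intro n _
  unfold Spec_get_weekends
  rw [pv_A, pv_B]
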